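-- pv_equiv track=rewrite | github.com/ayoubzulfiqar/Leetcode-Medium | AllthePairsWiththeMaximumNumberofCommonFollowers/all_the_pairs_with_the_maximum_number_of_common_followers.py | solve
-- ===== SOURCE A (Python) =====
-- import itertools
--
-- def solve(data):
--     person_followers = {}
--     for row in data:
--         if not row:
--             continue
--         person_id = row[0]
--         followers = set(row[1:])
--         person_followers[person_id] = followers
--
--     people = sorted(list(person_followers.keys()))
--
--     max_common = 0
--     result_pairs = []
--
--     if len(people) < 2:
--         return []
--
--     for p1, p2 in itertools.combinations(people, 2):
--         common = len(person_followers[p1] & person_followers[p2])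
--
--         if common > max_common:
--             max_common = common
--             result_pairs = [[p1, p2]]
--         elif common == max_common:
--             result_pairs.append([p1, p2])
--
--     return result_pairs
-- ===== SOURCE B (Python) =====
-- def _ordered_pairs(g):
--     return [(a, b) for i, a in enumerate(g) for b in g[i + 1:]]
--
--
-- def solve(data):
--     # person -> followers as an order-preserving deduplicated list (last row per person wins)
--     pf = {}
--     for row in data:
--         if row:
--             pf[row[0]] = list(dict.fromkeys(row[1:]))
--     people = sorted(pf)
--     if len(people) < 2:
--         return []
--     # invert: follower -> sorted list of the people it follows
--     ftp = {}
--     for p in people: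
--         for f in pf[p]:
--             ftp.setdefault(f, []).append(p)
--     # co-occurrence events: one pair per shared follower
--     co = [pr for g in ftp.values() for pr in _ordered_pairs(g)]
--     cnt = {}
--     for pr in co:
--         cnt[pr] = cnt.get(pr, 0) + 1
--     m = max(cnt.values(), default=0)
--     return [[x, y] for x, y in _ordered_pairs(people) if cnt.get((x, y), 0) == m]
-- ===== Notes on version B (the rewrite author's own statement) =====
-- stated objective: alternative
-- what changed: Instead of intersecting the two follower sets for every pair of people (O(P^2) set intersections), B inverts the mapping to follower->people, emits one co-occurrence event per (shared follower, pair) via per-group ordered pairs, tallies them in a dict, and selects the pairs whose tally equals the maximum.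
import Mathlib
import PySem

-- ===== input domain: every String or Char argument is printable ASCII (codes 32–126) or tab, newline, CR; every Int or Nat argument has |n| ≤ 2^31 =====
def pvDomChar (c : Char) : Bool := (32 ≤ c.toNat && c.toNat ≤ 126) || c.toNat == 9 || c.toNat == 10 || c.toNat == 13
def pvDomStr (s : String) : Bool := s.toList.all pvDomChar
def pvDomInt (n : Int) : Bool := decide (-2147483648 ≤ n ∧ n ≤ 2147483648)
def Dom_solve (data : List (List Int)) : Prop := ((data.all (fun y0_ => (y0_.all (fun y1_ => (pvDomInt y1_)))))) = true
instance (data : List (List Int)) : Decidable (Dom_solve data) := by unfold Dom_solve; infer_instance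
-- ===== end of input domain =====

-- B replaces A's per-pair set intersections by inverting to a follower→people index and
-- counting one co-occurrence event per shared follower (objective: alternative algorithm).

-- ===== PORT A =====
def solve (data : List (List Int)) : List (List Int) :=
  let pf : PySem.Dict Int (PySem.Set Int) :=
    data.foldl (fun d row =>
      match row with
      | [] => d
      | personId :: rest => d.insert personId (PySem.Set.ofList rest)) PySem.Dict.empty
  let people : List Int := PySem.List.sorted pf.keys (fun x => x) false
  if people.length < 2 then []
  else
    ((PySem.List.combinations people 2).foldl
      (fun (st : Int × List (List Int)) c =>
        match c with
        | [p1, p2] =>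
          let common : Int := ((PySem.Set.inter (pf.getD p1 []) (pf.getD p2 [])).length : Int)
          if common > st.1 then (common, [[p1, p2]])
          else if common = st.1 then (st.1, st.2 ++ [[p1, p2]])
          else st
        | _ => st) ((0 : Int), ([] : List (List Int)))).2

-- ===== PORT B =====
-- port of _ordered_pairs: [(a, b) for i, a in enumerate(g) for b in g[i+1:]]
def orderedPairs (g : List Int) : List (Int × Int) :=
  (PySem.List.enumerate g).flatMap (fun ia =>
    (PySem.List.slice g (some (ia.1 + 1)) none).map (fun b => (ia.2, b)))

def solve_alt (data : List (List Int)) : List (List Int) :=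
  let pf : PySem.Dict Int (List Int) :=
    data.foldl (fun d row =>
      match row with
      | [] => d
      | personId :: rest => d.insert personId (PySem.List.dedup rest)) PySem.Dict.empty
  let people : List Int := PySem.List.sorted pf.keys (fun x => x) false
  if people.length < 2 then []
  else
    let ftp : PySem.Dict Int (List Int) :=
      people.foldl (fun d p =>
        (pf.getD p []).foldl (fun d f => d.modify f [] (fun l => l ++ [p])) d) PySem.Dict.empty
    let co : List (Int × Int) := ftp.values.flatMap orderedPairs
    let cnt : PySem.Dict (Int × Int) Int :=
      co.foldl (fun d pr => d.insert pr (d.getD pr 0 + 1)) PySem.Dict.empty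
    let m : Int := PySem.List.maxD cnt.values (fun v => v) 0
    ((orderedPairs people).filter (fun pr => cnt.getD pr 0 == m)).map (fun pr => [pr.1, pr.2])

-- ===== PRECONDITION & SPEC =====
def Spec_solve (data : List (List Int)) (out : List (List Int)) : Prop := out = solve_alt data
instance (data : List (List Int)) (out : List (List Int)) : Decidable (Spec_solve data out) := by unfold Spec_solve; infer_instance

-- ===== CLAIM (what is proved, stated in full; the proofs are below) =====
def Claim_equal_solve : Prop := ∀ (data : List (List Int)), Dom_solve data → Spec_solve data (solve data)

-- ===== LEMMAS AND PROOFS =====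

def opRec : List Int → List (Int × Int)
  | [] => []
  | x :: t => (t.map (fun y => (x, y))) ++ opRec t
def opFrom : List Int → List Int → List (Int × Int)
  | _, [] => []
  | rest, x :: t => (rest.map (fun y => (x, y))) ++ opFrom rest.tail t

lemma op_aux (g : List Int) : ∀ (t : List Int) (k : Nat),
    (PySem.List.enumerate t (k : Int)).flatMap (fun ia =>
      (PySem.List.slice g (some (ia.1 + 1)) none).map (fun b => (ia.2, b)))
    = opFrom (g.drop (k + 1)) t := by
  intro t
  induction t with
  | nil => intro k; simp [PySem.List.enumerate, opFrom]
  | cons x t ih =>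
    intro k
    have h1 : PySem.List.enumerate (x :: t) (k : Int) = ((k : Int), x) :: PySem.List.enumerate t ((k : Int) + 1) := rfl
    have h2 : ((k : Int) + 1) = ((k + 1 : Nat) : Int) := by push_cast; ring
    have h3 : PySem.List.slice g (some ((k : Int) + 1)) none = g.drop (k + 1) := by
      rw [h2]
      have := PySem.List.slice_from g (a := ((k + 1 : Nat) : Int)) (Int.natCast_nonneg _)
      simpa using this
    rw [h1, List.flatMap_cons, h3, h2, ih (k + 1)]
    show (g.drop (k+1)).map (fun y => (x, y)) ++ opFrom (g.drop (k+1+1)) t = _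
    rw [opFrom, List.tail_drop]

lemma orderedPairs_eq (g : List Int) : orderedPairs g = opRec g := by
  have h0 : orderedPairs g = opFrom (g.drop 1) g := by
    have := op_aux g g 0
    simpa [orderedPairs] using this
  rw [h0]
  have : ∀ t : List Int, opFrom t.tail t = opRec t := by
    intro t
    induction t with
    | nil => rfl
    | cons x t ih => simp [opFrom, opRec, ih]
  simpa using this g

def pvBuildF (d : PySem.Dict Int (List Int)) (row : List Int) : PySem.Dict Int (List Int) :=
  match row with
  | [] => d
  | personId :: rest => d.insert personId (PySem.List.dedup rest)
def pvPf (data : List (List Int)) : PySem.Dict Int (List Int) :=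
  data.foldl pvBuildF PySem.Dict.empty
def pvPeople (data : List (List Int)) : List Int :=
  PySem.List.sorted (pvPf data).keys (fun x => x) false
def pvS (data : List (List Int)) (p : Int) : List Int := (pvPf data).getD p []
def pvCommon (data : List (List Int)) (pr : Int × Int) : Int :=
  ((PySem.Set.inter (pvS data pr.1) (pvS data pr.2)).length : Int)
def pvF (data : List (List Int)) : List (Int × Int) :=
  (pvPeople data).flatMap (fun p => (pvS data p).map (fun f => (f, p)))
def pvFtp (data : List (List Int)) : PySem.Dict Int (List Int) :=
  (pvPeople data).foldl (fun d p =>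
    (pvS data p).foldl (fun d f => d.modify f [] (fun l => l ++ [p])) d) PySem.Dict.empty
def pvGroup (data : List (List Int)) (f : Int) : List Int :=
  (pvPeople data).filter (fun p => decide (f ∈ pvS data p))
def pvCo (data : List (List Int)) : List (Int × Int) :=
  (pvFtp data).values.flatMap orderedPairs
def pvCnt (data : List (List Int)) : PySem.Dict (Int × Int) Int :=
  (pvCo data).foldl (fun d pr => d.insert pr (d.getD pr 0 + 1)) PySem.Dict.empty

lemma pvPf_keys_nodup (data : List (List Int)) : (pvPf data).keys.Nodup := by
  have : ∀ (l : List (List Int)) (d : PySem.Dict Int (List Int)),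
      d.keys.Nodup → (l.foldl pvBuildF d).keys.Nodup := by
    intro l
    induction l with
    | nil => intro d h; exact h
    | cons row t ih =>
      intro d h
      cases row with
      | nil => exact ih d h
      | cons pid rest => exact ih _ (PySem.Dict.nodup_keys_insert d pid _ h)
  exact this data PySem.Dict.empty (by simp [PySem.Dict.keys_empty])

lemma pvS_nodup (data : List (List Int)) (p : Int) : (pvS data p).Nodup := by
  have : ∀ (l : List (List Int)) (d : PySem.Dict Int (List Int)),
      (∀ k, (d.getD k []).Nodup) → ∀ k, ((l.foldl pvBuildF d).getD k []).Nodup := by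
    intro l
    induction l with
    | nil => intro d h; exact h
    | cons row t ih =>
      intro d h
      cases row with
      | nil => exact ih d h
      | cons pid rest =>
        refine ih _ ?_
        intro k
        show ((d.insert pid (PySem.List.dedup rest)).getD k []).Nodup
        rw [PySem.Dict.getD_insert]
        split_ifs with hk
        · exact PySem.Set.nodup_ofList rest
        · exact h k
  exact this data PySem.Dict.empty (fun k => by simp [PySem.Dict.getD_empty]) p

lemma pvPeople_nodup (data : List (List Int)) : (pvPeople data).Nodup :=
  (PySem.List.sorted_perm _ _ _).nodup_iff.mpr (pvPf_keys_nodup data)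

lemma pvPeople_lt (data : List (List Int)) : (pvPeople data).Pairwise (· < ·) := by
  have hle : (pvPeople data).Pairwise (· ≤ ·) := by
    have := PySem.List.sorted_pairwise (pvPf data).keys (fun x : Int => x)
    simpa [pvPeople] using this
  have hne : (pvPeople data).Pairwise (· ≠ ·) := pvPeople_nodup data
  exact (hle.and hne).imp (fun h => lt_of_le_of_ne h.1 h.2)

lemma foldl_nested (l : List Int) (S : Int → List Int) (d : PySem.Dict Int (List Int)) :
    l.foldl (fun d p => (S p).foldl (fun d f => d.modify f [] (fun l => l ++ [p])) d) d
    = (l.flatMap (fun p => (S p).map (fun f => (f, p)))).foldl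
        (fun d q => d.modify q.1 [] (fun l => l ++ [q.2])) d := by
  induction l generalizing d with
  | nil => rfl
  | cons p t ih =>
    rw [List.foldl_cons, List.flatMap_cons, List.foldl_append, List.foldl_map, ih]

lemma pvFtp_eq (data : List (List Int)) :
    pvFtp data = (pvF data).foldl (fun d q => d.modify q.1 [] (fun l => l ++ [q.2]))
      PySem.Dict.empty := by
  rw [pvFtp, foldl_nested, pvF]

lemma filter_beq_of_nodup (l : List Int) (f : Int) (hnd : l.Nodup) :
    l.filter (fun y => y == f) = if f ∈ l then [f] else [] := by
  induction l with
  | nil => simp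
  | cons y t ih =>
    have hy : y ∉ t := (List.nodup_cons.mp hnd).1
    have ht := ih (List.nodup_cons.mp hnd).2
    by_cases hyf : y = f
    · subst hyf
      simp [ht, hy]
    · simp [hyf, ht, Ne.symm hyf]

lemma pvFtp_getD (data : List (List Int)) (f : Int) :
    (pvFtp data).getD f [] = pvGroup data f := by
  rw [pvFtp_eq, PySem.Dict.getD_foldl_modify_append, PySem.Dict.getD_empty, List.nil_append,
    pvF, pvGroup]
  have : ∀ (l : List Int),
      ((l.flatMap (fun p => (pvS data p).map (fun ff => (ff, p)))).filter
        (fun q => q.1 == f)).map (fun q => q.2)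
      = l.filter (fun p => decide (f ∈ pvS data p)) := by
    intro l
    induction l with
    | nil => simp
    | cons p t ih =>
      rw [List.flatMap_cons, List.filter_append, List.map_append, ih, List.filter_map]
      have : ((pvS data p).filter ((fun q : Int × Int => q.1 == f) ∘ (fun ff => (ff, p))))
          = (pvS data p).filter (fun y => y == f) := by rfl
      rw [this, filter_beq_of_nodup _ _ (pvS_nodup data p), List.filter_cons]
      by_cases hf : f ∈ pvS data p
      · simp [hf]
      · simp [hf]
  exact this (pvPeople data)

lemma pvFtp_keys (data : List (List Int)) :
    (pvFtp data).keys = PySem.Set.ofList ((pvF data).map (fun q => q.1)) := by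
  rw [pvFtp_eq]
  have := PySem.Dict.keys_foldl_modify_key (pvF data) (fun q : Int × Int => q.1) []
    (fun d q l => l ++ [q.2]) PySem.Dict.empty
  rw [this]
  rfl

lemma pvFtp_keys_nodup (data : List (List Int)) : (pvFtp data).keys.Nodup := by
  rw [pvFtp_keys]
  exact PySem.Set.nodup_ofList _

lemma mem_ftp_keys_iff (data : List (List Int)) (f : Int) :
    f ∈ (pvFtp data).keys ↔ ∃ p ∈ pvPeople data, f ∈ pvS data p := by
  rw [pvFtp_keys, PySem.Set.mem_ofList, List.mem_map]
  constructor
  · rintro ⟨⟨f', p⟩, hq, rfl⟩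
    rw [pvF, List.mem_flatMap] at hq
    obtain ⟨p', hp', hq⟩ := hq
    rw [List.mem_map] at hq
    obtain ⟨ff, hff, heq⟩ := hq
    obtain ⟨rfl, rfl⟩ := Prod.mk.injEq .. ▸ (by exact ⟨congrArg Prod.fst heq, congrArg Prod.snd heq⟩ : ff = f' ∧ p' = p)
    exact ⟨p, hp', hff⟩
  · rintro ⟨p, hp, hf⟩
    refine ⟨(f, p), ?_, rfl⟩
    rw [pvF, List.mem_flatMap]
    exact ⟨p, hp, List.mem_map.mpr ⟨f, hf, rfl⟩⟩

lemma pvCnt_getD (data : List (List Int)) (pr : Int × Int) :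
    (pvCnt data).getD pr 0 = ((pvCo data).count pr : Int) := by
  rw [pvCnt, PySem.Dict.getD_foldl_insert_add_one, PySem.Dict.getD_empty, zero_add]

lemma pvCnt_keys (data : List (List Int)) :
    (pvCnt data).keys = PySem.Set.ofList (pvCo data) := by
  rw [pvCnt, PySem.Dict.keys_foldl_insert]
  rfl

lemma pvCnt_keys_nodup (data : List (List Int)) : (pvCnt data).keys.Nodup := by
  rw [pvCnt_keys]; exact PySem.Set.nodup_ofList _

lemma count_map_pair (x a b : Int) (t : List Int) :
    (t.map (fun y => (x, y))).count (a, b) = if x = a then t.count b else 0 := by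
  induction t with
  | nil => simp
  | cons y t ih =>
    simp only [List.map_cons, List.count_cons, ih]
    by_cases hx : x = a
    · subst hx
      by_cases hy : y = b
      · subst hy; simp
      · simp [hy, Prod.ext_iff]
    · simp [hx, Prod.ext_iff]

lemma opRec_count {g : List Int} (hg : g.Pairwise (· < ·)) (a b : Int) :
    (opRec g).count (a, b) = if a ∈ g ∧ b ∈ g ∧ a < b then 1 else 0 := by
  induction g with
  | nil => simp [opRec]
  | cons x t ih =>
    have hx : ∀ y ∈ t, x < y := fun y hy => (List.pairwise_cons.mp hg).1 y hy
    have ht : t.Pairwise (· < ·) := (List.pairwise_cons.mp hg).2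
    have hnd : t.Nodup := ht.imp (fun h => ne_of_lt h)
    rw [opRec, List.count_append, count_map_pair, ih ht]
    have hcnt : t.count b = if b ∈ t then 1 else 0 := by
      by_cases hbt : b ∈ t
      · simp [hbt, List.count_eq_one_of_mem hnd hbt]
      · simp [hbt, List.count_eq_zero_of_not_mem hbt]
    rw [hcnt]
    have hxt : x ∉ t := fun h => lt_irrefl x (hx x h)
    split_ifs with h1 h2 h3 h4 h5 h6 h7 h8 <;> simp_all
    · omega
    · rename_i himp hcond
      obtain ⟨ha, hb, hab⟩ := hcond
      rcases ha with rfl | ha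
      · exact h1 rfl
      · rcases hb with rfl | hb
        · exact absurd hab (not_lt.mpr (le_of_lt (hx a ha)))
        · exact himp ha hb

lemma opRec_mem {g : List Int} (hg : g.Pairwise (· < ·)) (a b : Int) :
    (a, b) ∈ opRec g ↔ a ∈ g ∧ b ∈ g ∧ a < b := by
  rw [← List.count_pos_iff, opRec_count hg]
  split_ifs with h <;> simp [h]

lemma combinations_two (g : List Int) :
    PySem.List.combinations g 2 = (opRec g).map (fun pr => [pr.1, pr.2]) := by
  induction g with
  | nil => simp [PySem.List.combinations_nil_succ, opRec]
  | cons x t ih =>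
    rw [show (2 : Nat) = 1 + 1 from rfl, PySem.List.combinations_cons_succ,
      PySem.List.combinations_one, opRec, List.map_append, ih]
    simp [List.map_map, Function.comp]

lemma pvCo_count (data : List (List Int)) {a b : Int} (ha : a ∈ pvPeople data)
    (hb : b ∈ pvPeople data) (hab : a < b) :
    ((pvCo data).count (a, b) : Int) = pvCommon data (a, b) := by
  have hvals : (pvFtp data).values = (pvFtp data).keys.map (fun k => (pvFtp data).getD k []) :=
    PySem.Dict.values_eq_map_keys _ (pvFtp_keys_nodup data) []
  have hco : pvCo data = (pvFtp data).keys.flatMap (fun f => opRec (pvGroup data f)) := by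
    rw [pvCo, hvals, List.flatMap_map]
    simp only [pvFtp_getD, orderedPairs_eq]
  have hgrp_lt : ∀ f : Int, (pvGroup data f).Pairwise (· < ·) :=
    fun f => (pvPeople_lt data).filter _
  have hcnt : ∀ f : Int, (opRec (pvGroup data f)).count (a, b)
      = if decide (f ∈ pvS data a) && decide (f ∈ pvS data b) then 1 else 0 := by
    intro f
    rw [opRec_count (hgrp_lt f)]
    have hiff : (a ∈ pvGroup data f ∧ b ∈ pvGroup data f ∧ a < b)
        ↔ (decide (f ∈ pvS data a) && decide (f ∈ pvS data b)) = true := by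
      simp [pvGroup, List.mem_filter, ha, hb, hab]
    by_cases h : (decide (f ∈ pvS data a) && decide (f ∈ pvS data b)) = true
    · rw [if_pos (hiff.mpr h), if_pos h]
    · rw [if_neg (fun hc => h (hiff.mp hc)), if_neg h]
  rw [hco, List.count_flatMap]
  have hmap : ((pvFtp data).keys.map (List.count (a, b) ∘ fun f => opRec (pvGroup data f)))
      = (pvFtp data).keys.map (fun f =>
          if decide (f ∈ pvS data a) && decide (f ∈ pvS data b) then 1 else 0) := by
    apply List.map_congr_left
    intro f _
    exact hcnt f
  rw [hmap, PySem.List.sum_map_ite_one_zero_nat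
    (fun f => decide (f ∈ pvS data a) && decide (f ∈ pvS data b)) ((pvFtp data).keys)]
  rw [List.countP_eq_length_filter]
  have hperm : ((pvFtp data).keys.filter
        (fun f => decide (f ∈ pvS data a) && decide (f ∈ pvS data b))).Perm
      ((pvS data a).filter (fun x => (pvS data b).contains x)) := by
    apply (List.perm_ext_iff_of_nodup
      ((pvFtp_keys_nodup data).filter _) ((pvS_nodup data a).filter _)).mpr
    intro x
    simp only [List.mem_filter, Bool.and_eq_true, decide_eq_true_eq, List.contains_iff_mem]
    constructor
    · rintro ⟨_, hxa, hxb⟩; exact ⟨hxa, hxb⟩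
    · rintro ⟨hxa, hxb⟩
      exact ⟨(mem_ftp_keys_iff data x).mpr ⟨a, ha, hxa⟩, hxa, hxb⟩
  rw [hperm.length_eq]
  rfl

lemma cnt_getD_eq_common (data : List (List Int)) {pr : Int × Int}
    (h : pr ∈ opRec (pvPeople data)) :
    (pvCnt data).getD pr 0 = pvCommon data pr := by
  obtain ⟨a, b⟩ := pr
  obtain ⟨ha, hb, hab⟩ := (opRec_mem (pvPeople_lt data) a b).mp h
  rw [pvCnt_getD, pvCo_count data ha hb hab]

lemma co_mem_opRec (data : List (List Int)) {pr : Int × Int} (h : pr ∈ pvCo data) :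
    pr ∈ opRec (pvPeople data) := by
  obtain ⟨a, b⟩ := pr
  rw [pvCo, List.mem_flatMap] at h
  obtain ⟨g, hg, hpr⟩ := h
  have hvals : (pvFtp data).values = (pvFtp data).keys.map (fun k => (pvFtp data).getD k []) :=
    PySem.Dict.values_eq_map_keys _ (pvFtp_keys_nodup data) []
  rw [hvals, List.mem_map] at hg
  obtain ⟨f, _, rfl⟩ := hg
  rw [pvFtp_getD, orderedPairs_eq] at hpr
  have hlt : (pvGroup data f).Pairwise (· < ·) := (pvPeople_lt data).filter _
  obtain ⟨hag, hbg, hab⟩ := (opRec_mem hlt a b).mp hpr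
  exact (opRec_mem (pvPeople_lt data) a b).mpr
    ⟨(List.mem_filter.mp hag).1, (List.mem_filter.mp hbg).1, hab⟩

lemma maxD_facts (l : List Int) :
    (PySem.List.maxD l (fun v => v) 0 = 0 ∨ PySem.List.maxD l (fun v => v) 0 ∈ l)
    ∧ ∀ v ∈ l, v ≤ PySem.List.maxD l (fun v => v) 0 := by
  cases l with
  | nil => exact ⟨Or.inl rfl, by simp⟩
  | cons v vt =>
    have heq : PySem.List.maxD (v :: vt) (fun v => v) 0 = vt.foldl max v := by
      rw [PySem.List.maxD, PySem.List.max?_id_cons]; rfl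
    constructor
    · rw [heq]
      rcases PySem.List.foldl_max_mem vt v with h | h
      · exact Or.inr (by rw [h]; exact List.mem_cons_self)
      · exact Or.inr (List.mem_cons_of_mem _ h)
    · intro w hw
      rw [heq]
      rcases List.mem_cons.mp hw with rfl | h
      · exact (PySem.List.le_foldl_max vt w).1
      · exact (PySem.List.le_foldl_max vt v).2 w h

lemma max_eq (data : List (List Int)) :
    PySem.List.maxD (pvCnt data).values (fun v => v) 0
      = (opRec (pvPeople data)).foldl (fun acc pr => max acc (pvCommon data pr)) 0 := by
  have hMfacts := PySem.List.le_foldl_max_int (opRec (pvPeople data)) (pvCommon data) 0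
  have hvals : (pvCnt data).values = (pvCnt data).keys.map (fun k => (pvCnt data).getD k 0) :=
    PySem.Dict.values_eq_map_keys _ (pvCnt_keys_nodup data) 0
  have hval_eq_common : ∀ v ∈ (pvCnt data).values, ∃ pr ∈ opRec (pvPeople data),
      v = pvCommon data pr := by
    intro v hv
    rw [hvals, List.mem_map] at hv
    obtain ⟨k, hk, rfl⟩ := hv
    rw [pvCnt_keys, PySem.Set.mem_ofList] at hk
    have hmem := co_mem_opRec data hk
    exact ⟨k, hmem, cnt_getD_eq_common data hmem⟩
  have hvnn : ∀ v ∈ (pvCnt data).values, 0 ≤ v := by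
    intro v hv
    rw [hvals] at hv
    obtain ⟨k, _, rfl⟩ := List.mem_map.mp hv
    rw [pvCnt_getD]
    positivity
  have h0m : 0 ≤ PySem.List.maxD (pvCnt data).values (fun v => v) 0 := by
    rcases (maxD_facts (pvCnt data).values).1 with h | h
    · rw [h]
    · exact hvnn _ h
  apply le_antisymm
  · rcases (maxD_facts (pvCnt data).values).1 with h | h
    · rw [h]; exact hMfacts.1
    · obtain ⟨pr, hpr, heq⟩ := hval_eq_common _ h
      rw [heq]
      exact hMfacts.2 pr hpr
  · have hMfold : (opRec (pvPeople data)).foldl (fun acc pr => max acc (pvCommon data pr)) 0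
        = ((opRec (pvPeople data)).map (pvCommon data)).foldl max 0 := by
      rw [List.foldl_map]
    rw [hMfold]
    rcases PySem.List.foldl_max_mem ((opRec (pvPeople data)).map (pvCommon data)) 0 with h | h
    · rw [h]; exact h0m
    · rw [List.mem_map] at h
      obtain ⟨pr, hpr, heq⟩ := h
      rw [← heq]
      by_cases hpos : 0 < pvCommon data pr
      · obtain ⟨a, b⟩ := pr
        obtain ⟨ha, hb, hab⟩ := (opRec_mem (pvPeople_lt data) a b).mp hpr
        have hcnt := pvCo_count data ha hb hab
        have hmem_co : (a, b) ∈ pvCo data := by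
          by_contra hc
          rw [List.count_eq_zero_of_not_mem hc] at hcnt
          rw [← hcnt] at hpos
          simp at hpos
        have hkey : (a, b) ∈ (pvCnt data).keys := by
          rw [pvCnt_keys, PySem.Set.mem_ofList]; exact hmem_co
        have hvmem : (pvCnt data).getD (a, b) 0 ∈ (pvCnt data).values := by
          rw [hvals]; exact List.mem_map.mpr ⟨(a, b), hkey, rfl⟩
        have := (maxD_facts (pvCnt data).values).2 _ hvmem
        rwa [cnt_getD_eq_common data hpr] at this
      · exact le_trans (not_lt.mp hpos) h0m

lemma argmax_fold {α : Type} (f : α → Int) (g : α → List Int) :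
    ∀ (l : List α) (m : Int) (acc : List (List Int)),
    l.foldl (fun st x =>
        if f x > st.1 then (f x, [g x])
        else if f x = st.1 then (st.1, st.2 ++ [g x])
        else st) (m, acc)
    = (l.foldl (fun a x => max a (f x)) m,
       (if l.foldl (fun a x => max a (f x)) m = m then acc else [])
         ++ (l.filter (fun x => f x == l.foldl (fun a x => max a (f x)) m)).map g) := by
  intro l
  induction l with
  | nil => intro m acc; simp
  | cons x t ih =>
    intro m acc
    simp only [List.foldl_cons]
    by_cases h1 : f x > m
    · rw [if_pos h1, ih (f x) [g x]]
      have hmx : max m (f x) = f x := max_eq_right h1.le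
      simp only [hmx]
      have hTge : f x ≤ t.foldl (fun a x => max a (f x)) (f x) :=
        (PySem.List.le_foldl_max_int t f (f x)).1
      have hTne : t.foldl (fun a x => max a (f x)) (f x) ≠ m := by
        intro hc; rw [hc] at hTge; exact absurd h1 (not_lt.mpr hTge)
      rw [if_neg hTne]
      by_cases h2 : f x = t.foldl (fun a x => max a (f x)) (f x)
      · simp [← h2]
      · simp [h2, Ne.symm h2]
    · rw [if_neg h1]
      by_cases h2 : f x = m
      · rw [if_pos h2, ih m (acc ++ [g x])]
        have hmx : max m (f x) = m := by rw [h2]; exact max_self m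
        simp only [hmx]
        by_cases h3 : t.foldl (fun a x => max a (f x)) m = m
        · rw [if_pos h3, if_pos h3]
          have hfx : f x = t.foldl (fun a x => max a (f x)) m := by rw [h2, h3]
          simp [← hfx]
        · rw [if_neg h3, if_neg h3]
          have hfx : ¬ f x = t.foldl (fun a x => max a (f x)) m := by
            rw [h2]; exact fun hc => h3 hc.symm
          simp [hfx]
      · rw [if_neg h2, ih m acc]
        have hlt : f x < m := lt_of_le_of_ne (not_lt.mp h1) h2
        have hmx : max m (f x) = m := max_eq_left hlt.le
        simp only [hmx]
        have hTm : m ≤ t.foldl (fun a x => max a (f x)) m :=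
          (PySem.List.le_foldl_max_int t f m).1
        have hfx : ¬ f x = t.foldl (fun a x => max a (f x)) m := by
          intro hc; rw [hc] at hlt; exact absurd hTm (not_le.mpr hlt)
        simp [hfx]

theorem solve_eq_alt (data : List (List Int)) : solve data = solve_alt data := by
  show (if (pvPeople data).length < 2 then ([] : List (List Int))
    else ((PySem.List.combinations (pvPeople data) 2).foldl
      (fun (st : Int × List (List Int)) c =>
        match c with
        | [p1, p2] =>
          let common : Int := ((PySem.Set.inter (pvS data p1) (pvS data p2)).length : Int)
          if common > st.1 then (common, [[p1, p2]])
          else if common = st.1 then (st.1, st.2 ++ [[p1, p2]])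
          else st
        | _ => st) ((0 : Int), ([] : List (List Int)))).2)
    = (if (pvPeople data).length < 2 then ([] : List (List Int))
       else ((orderedPairs (pvPeople data)).filter
          (fun pr => (pvCnt data).getD pr 0
            == PySem.List.maxD (pvCnt data).values (fun v => v) 0)).map
          (fun pr => [pr.1, pr.2]))
  by_cases hlen : (pvPeople data).length < 2
  · rw [if_pos hlen, if_pos hlen]
  · rw [if_neg hlen, if_neg hlen]
    rw [combinations_two, List.foldl_map]
    have hstep : (fun (st : Int × List (List Int)) (pr : Int × Int) =>
        match [pr.1, pr.2] with
        | [p1, p2] =>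
          let common : Int := ((PySem.Set.inter (pvS data p1) (pvS data p2)).length : Int)
          if common > st.1 then (common, [[p1, p2]])
          else if common = st.1 then (st.1, st.2 ++ [[p1, p2]])
          else st
        | _ => st)
      = (fun (st : Int × List (List Int)) (pr : Int × Int) =>
          if pvCommon data pr > st.1 then (pvCommon data pr, [[pr.1, pr.2]])
          else if pvCommon data pr = st.1 then (st.1, st.2 ++ [[pr.1, pr.2]])
          else st) := by
      funext st pr
      rfl
    rw [hstep, argmax_fold (pvCommon data) (fun pr => [pr.1, pr.2]) (opRec (pvPeople data)) 0 []]
    rw [orderedPairs_eq, max_eq]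
    have hfeq : ∀ pr ∈ opRec (pvPeople data),
        ((pvCnt data).getD pr 0
          == (opRec (pvPeople data)).foldl (fun acc pr => max acc (pvCommon data pr)) 0)
        = (pvCommon data pr
          == (opRec (pvPeople data)).foldl (fun a x => max a (pvCommon data x)) 0) := by
      intro pr hpr
      rw [cnt_getD_eq_common data hpr]
    rw [List.filter_congr hfeq]
    simp

-- ===== VERDICT (by name: the statement is the Claim_ definition above) =====
theorem solve_spec : Claim_equal_solve := by
  intro data _
  unfold Spec_solve
  exact solve_eq_alt data
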